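-- pv_equiv track=rewrite | github.com/rshafeev/arch-specs | src/diagrams_generator/diagrams/styles_wrapper.py | __get_key_in_drawio_format
-- ===== SOURCE A (Python) =====
-- def __get_key_in_drawio_format(key: str):
--     s = ""
--     for idx, ch in enumerate(key):
--         if ch == '-':
--             continue
--         if idx > 0 and key[idx - 1] == '-':
--             s = s + key[idx].upper()
--         else:
--             s = s + ch
--     return s
-- ===== SOURCE B (Python) =====
-- def __get_key_in_drawio_format(key: str):
--     parts = key.split('-')
--     return parts[0] + ''.join(p[:1].upper() + p[1:] for p in parts[1:])
-- ===== Notes on version B (the rewrite author's own statement) =====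
-- stated objective: simpler
-- what changed: Replaced the indexed character loop with its key[idx-1] look-back by splitting the key on the dash, capitalising the first character of each later segment, and joining.
import Mathlib
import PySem

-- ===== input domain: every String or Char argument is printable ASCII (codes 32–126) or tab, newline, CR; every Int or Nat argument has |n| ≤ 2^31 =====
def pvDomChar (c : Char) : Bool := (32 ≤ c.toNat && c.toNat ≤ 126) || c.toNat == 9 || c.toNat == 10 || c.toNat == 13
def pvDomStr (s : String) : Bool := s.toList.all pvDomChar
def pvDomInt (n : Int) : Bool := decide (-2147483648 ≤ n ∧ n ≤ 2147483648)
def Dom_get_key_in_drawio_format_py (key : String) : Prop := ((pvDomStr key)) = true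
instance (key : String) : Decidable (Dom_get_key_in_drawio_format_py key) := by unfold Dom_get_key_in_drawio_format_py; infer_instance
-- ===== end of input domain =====

-- B replaces A's indexed character scan (with a look-back at key[idx-1]) by splitting on '-'
-- and joining the segments with their first characters uppercased; objective: simpler.

-- ===== PORT A =====
-- A's loop: for idx, ch in enumerate(key): skip '-', uppercase key[idx] after a '-', else keep ch.
-- key[idx-1] and key[idx] are always in range where evaluated, so pyGetD's default ' ' is unreachable.
def get_key_in_drawio_format_py (key : String) : String :=
  String.ofList ((PySem.List.enumerate key.toList 0).foldl
    (fun s p =>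
      if p.2 = '-' then s
      else if 0 < p.1 ∧ PySem.List.pyGetD key.toList (p.1 - 1) ' ' = '-' then
        s ++ [PySem.Chars.upperChar (PySem.List.pyGetD key.toList p.1 ' ')]
      else s ++ [p.2]) [])

-- ===== PORT B =====
-- parts = key.split('-'); parts[0] + ''.join(p[:1].upper() + p[1:] for p in parts[1:])
def get_key_in_drawio_format_py_alt (key : String) : String :=
  match PySem.Chars.splitOn key.toList ['-'] with
  | [] => ""  -- unreachable: str.split never returns an empty list
  | p :: rest =>
      String.ofList (p ++ PySem.Chars.join [] (rest.map (fun q =>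
        PySem.Chars.upper (PySem.List.slice q (some 0) (some 1)) ++
          PySem.List.slice q (some 1) none)))

-- ===== PRECONDITION & SPEC =====
def Spec_get_key_in_drawio_format_py (key : String) (out : String) : Prop := out = get_key_in_drawio_format_py_alt key
instance (key : String) (out : String) : Decidable (Spec_get_key_in_drawio_format_py key out) := by unfold Spec_get_key_in_drawio_format_py; infer_instance

-- ===== CLAIM (what is proved, stated in full; the proofs are below) =====
def Claim_equal_get_key_in_drawio_format_py : Prop := ∀ (key : String), Dom_get_key_in_drawio_format_py key → Spec_get_key_in_drawio_format_py key (get_key_in_drawio_format_py key)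

-- ===== LEMMAS AND PROOFS =====

-- middle spec: a scan carrying the flag "previous char was a dash"
def pvGo : List Char → Bool → List Char
  | [], _ => []
  | c :: cs, flag =>
      if c = '-' then pvGo cs true
      else (if flag then PySem.Chars.upperChar c else c) :: pvGo cs false

-- B's per-segment capitalisation, as a named function for the proofs
def pvCap (q : List Char) : List Char :=
  PySem.Chars.upper (PySem.List.slice q (some 0) (some 1)) ++ PySem.List.slice q (some 1) none

theorem pvCap_nil : pvCap [] = [] := by decide

theorem pvCap_cons (x : Char) (xs : List Char) :
    pvCap (x :: xs) = PySem.Chars.upperChar x :: xs := by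
  simp [pvCap, PySem.List.slice_toNat, PySem.Chars.upper, PySem.List.slice_from]

theorem pvJoin_nil_flatten (xs : List (List Char)) :
    PySem.Chars.join [] xs = xs.flatten := by
  induction xs with
  | nil => rfl
  | cons a t ih =>
      cases t with
      | nil => simp [PySem.Chars.join, List.intercalate]
      | cons b r => rw [PySem.Chars.join_cons_cons]; simp [ih]

-- PySem.Chars.splitOn with the single-character separator '-' is List.splitOn '-'
theorem pvSplitGo (fuel : Nat) (l cur : List Char) (acc : List (List Char))
    (h : l.length ≤ fuel) :
    PySem.Chars.splitOn.go ['-'] fuel l cur acc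
      = acc.reverse ++ (l.splitOn '-').modifyHead (cur.reverse ++ ·) := by
  induction fuel generalizing l cur acc with
  | zero =>
      cases l with
      | nil => simp [PySem.Chars.splitOn.go, List.splitOn, List.splitOnP_nil]
      | cons c cs => simp at h
  | succ fuel ih =>
      cases l with
      | nil => simp [PySem.Chars.splitOn.go, List.splitOn, List.splitOnP_nil]
      | cons c cs =>
          simp only [List.length_cons, Nat.succ_le_succ_iff] at h
          by_cases hc : c = '-'
          · subst hc
            rw [show PySem.Chars.splitOn.go ['-'] (fuel + 1) ('-' :: cs) cur acc
                  = PySem.Chars.splitOn.go ['-'] fuel cs [] (cur.reverse :: acc) from by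
                simp [PySem.Chars.splitOn.go, List.isPrefixOf]]
            rw [ih cs [] (cur.reverse :: acc) h]
            cases hs : cs.splitOn '-' with
            | nil => exact absurd hs (by simpa [List.splitOn] using List.splitOnP_ne_nil (fun x => x == '-') cs)
            | cons p r =>
                simp [List.splitOn, List.splitOnP_cons,
                  show List.splitOnP (fun x => x == '-') cs = p :: r from hs]
          · rw [show PySem.Chars.splitOn.go ['-'] (fuel + 1) (c :: cs) cur acc
                  = PySem.Chars.splitOn.go ['-'] fuel cs (c :: cur) acc from by
                simp [PySem.Chars.splitOn.go, List.isPrefixOf]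
                intro h; exact absurd h.symm hc]
            rw [ih cs (c :: cur) acc h]
            cases hs : cs.splitOn '-' with
            | nil => exact absurd hs (by simpa [List.splitOn] using List.splitOnP_ne_nil (fun x => x == '-') cs)
            | cons p r =>
                simp [List.splitOn, List.splitOnP_cons, hc,
                  show List.splitOnP (fun x => x == '-') cs = p :: r from hs]

theorem pvSplitChar (cs : List Char) :
    PySem.Chars.splitOn cs ['-'] = cs.splitOn '-' := by
  rw [PySem.Chars.splitOn, pvSplitGo _ _ _ _ (by omega)]
  cases hs : cs.splitOn '-' with
  | nil => exact absurd hs (by simpa [List.splitOn] using List.splitOnP_ne_nil (fun x => x == '-') cs)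
  | cons p r => simp

-- the dash-flag scan equals B's split-capitalise-join shape
theorem pvGo_split (cs : List Char) (flag : Bool) :
    pvGo cs flag
      = (match cs.splitOn '-' with
          | [] => []
          | p :: rest => (if flag then pvCap p else p) ++ (rest.map pvCap).flatten) := by
  induction cs generalizing flag with
  | nil => cases flag <;> simp [pvGo, List.splitOn, List.splitOnP_nil, pvCap_nil]
  | cons c cs ih =>
      by_cases hc : c = '-'
      · subst hc
        simp only [pvGo]
        rw [ih true]
        cases hs : cs.splitOn '-' with
        | nil => exact absurd hs (by simpa [List.splitOn] using List.splitOnP_ne_nil (fun x => x == '-') cs)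
        | cons p r =>
            have h2 : ('-' :: cs).splitOn '-' = [] :: p :: r := by
              simp [List.splitOn, List.splitOnP_cons,
                show List.splitOnP (fun x => x == '-') cs = p :: r from hs]
            rw [h2]
            cases flag <;> simp [pvCap_nil]
      · simp only [pvGo, if_neg hc]
        rw [ih false]
        cases hs : cs.splitOn '-' with
        | nil => exact absurd hs (by simpa [List.splitOn] using List.splitOnP_ne_nil (fun x => x == '-') cs)
        | cons p r =>
            have h2 : (c :: cs).splitOn '-' = (c :: p) :: r := by
              simp [List.splitOn, List.splitOnP_cons, hc,
                show List.splitOnP (fun x => x == '-') cs = p :: r from hs]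
            rw [h2]
            cases flag <;> simp [pvCap_cons]

-- the char A reads back at index pre.length - 1 is pre's last char
theorem pvPrev (pre rest : List Char) (x : Char) (d : Char) :
    PySem.List.pyGetD ((pre ++ [x]) ++ rest) (((pre ++ [x]).length : Int) - 1) d = x := by
  have h1 : ((pre ++ [x]).length : Int) - 1 = (pre.length : Int) := by
    simp only [List.length_append, List.length_cons, List.length_nil]; push_cast; ring
  have h2 : (pre ++ [x]) ++ rest = pre ++ x :: rest := by simp
  rw [h1, h2, PySem.List.pyGetD, PySem.List.pyGet?_append_length]
  rfl

-- A's fold, resumed after a processed prefix `pre`, appends pvGo of the remainder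
theorem pvFoldA (full : List Char) (cs pre : List Char) (acc : List Char)
    (hfull : full = pre ++ cs) :
    (PySem.List.enumerate cs (pre.length : Int)).foldl
      (fun s p =>
        if p.2 = '-' then s
        else if 0 < p.1 ∧ PySem.List.pyGetD full (p.1 - 1) ' ' = '-' then
          s ++ [PySem.Chars.upperChar (PySem.List.pyGetD full p.1 ' ')]
        else s ++ [p.2]) acc
      = acc ++ pvGo cs (pre.getLast? == some '-') := by
  induction cs generalizing pre acc with
  | nil => simp [PySem.List.enumerate_nil, pvGo]
  | cons c cs ih =>
      rw [PySem.List.enumerate_cons]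
      simp only [List.foldl_cons]
      have hcur : PySem.List.pyGetD full (pre.length : Int) ' ' = c := by
        rw [hfull, PySem.List.pyGetD, PySem.List.pyGet?_append_length]; rfl
      have hnext : (pre.length : Int) + 1 = ((pre ++ [c]).length : Int) := by simp
      by_cases hc : c = '-'
      · subst hc
        rw [if_pos rfl, hnext, ih (pre ++ ['-']) acc (by simpa using hfull)]
        simp [pvGo]
      · rw [if_neg hc]
        rcases List.eq_nil_or_concat pre with hpre | ⟨q, x, hpre⟩
        · subst hpre
          have hidx : ¬ (0 < ((List.length ([] : List Char)) : Int) ∧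
              PySem.List.pyGetD full (((List.length ([] : List Char)) : Int) - 1) ' ' = '-') := by
            simp
          rw [if_neg hidx, hnext, ih ([] ++ [c]) (acc ++ [c]) (by simpa using hfull)]
          have h4 : (([] ++ [c] : List Char).getLast? == some '-') = false := by simp [hc]
          rw [h4]
          simp [pvGo, hc]
        · rw [List.concat_eq_append] at hpre
          subst hpre
          have hlast : (q ++ [x]).getLast? = some x := by simp
          have hprev : PySem.List.pyGetD full (((q ++ [x]).length : Int) - 1) ' ' = x := by
            rw [hfull]; exact pvPrev q (c :: cs) x ' '
          by_cases hx : x = '-'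
          · have hpos : (0 : Int) < (((q ++ [x]).length : Int)) := by
              simp only [List.length_append, List.length_cons, List.length_nil]
              push_cast; omega
            have hidx : 0 < (((q ++ [x]).length : Int)) ∧
                PySem.List.pyGetD full (((q ++ [x]).length : Int) - 1) ' ' = '-' :=
              ⟨hpos, by rw [hprev, hx]⟩
            rw [if_pos hidx, hcur, hnext,
              ih ((q ++ [x]) ++ [c]) (acc ++ [PySem.Chars.upperChar c]) (by simpa using hfull)]
            have h3 : ((q ++ [x]).getLast? == some '-') = true := by simp [hx]
            have h4 : (((q ++ [x]) ++ [c]).getLast? == some '-') = false := by simp [hc]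
            rw [h3, h4]
            simp [pvGo, hc]
          · have hidx : ¬ (0 < (((q ++ [x]).length : Int)) ∧
                PySem.List.pyGetD full (((q ++ [x]).length : Int) - 1) ' ' = '-') := by
              rw [hprev]; simp [hx]
            rw [if_neg hidx, hnext,
              ih ((q ++ [x]) ++ [c]) (acc ++ [c]) (by simpa using hfull)]
            have h3 : ((q ++ [x]).getLast? == some '-') = false := by simp [hx]
            have h4 : (((q ++ [x]) ++ [c]).getLast? == some '-') = false := by simp [hc]
            rw [h3, h4]
            simp [pvGo, hc]

-- ===== VERDICT (by name: the statement is the Claim_ definition above) =====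
theorem get_key_in_drawio_format_py_spec : Claim_equal_get_key_in_drawio_format_py := by
  intro key _
  unfold Spec_get_key_in_drawio_format_py get_key_in_drawio_format_py get_key_in_drawio_format_py_alt
  have hA := pvFoldA key.toList key.toList [] [] rfl
  simp only [List.length_nil, Nat.cast_zero, List.getLast?_nil] at hA
  rw [hA, pvSplitChar]
  cases hs : key.toList.splitOn '-' with
  | nil => exact absurd hs (by simpa [List.splitOn] using List.splitOnP_ne_nil (fun x => x == '-') key.toList)
  | cons p rest =>
      simp only [List.nil_append]
      have hB := pvGo_split key.toList false
      rw [hs] at hB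
      simp only [Bool.false_eq_true, if_false] at hB
      rw [show ((none : Option Char) == some '-') = false from rfl, hB, pvJoin_nil_flatten]
      rfl
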